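-- pv_equiv track=rewrite | github.com/danm7251/CSCM712 | lab9/hashing.py | strtable
-- ===== SOURCE A (Python) =====
-- from copy import copy
--
-- def strtable(t):
--     nCol = max(map(len, t))
--     h = '-'
--     x = '+'
--     tt = '+'
--     lt = '+'
--     ur = '+'
--     ul = '+'
--     lr = '+'
--     ll = '+'
--     xl = '+'
--     xr = '+'
--     # comment out/delete the next 10 lines if your terminal can't deal with UTF8
--     h = '━'
--     x = '╋'
--     tt = '┳'
--     lt = '┻'
--     ul = '┏'
--     ur = '┓'
--     lr = '┛'
--     ll = '┗'
--     v = '┃'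
--     xl = '┣'
--     xr = '┫'
--     def get(i,j):
--         try:
--             return str(t[i][j])
--         except Exception:
--             return ''
--     def intersperse(d, xs):
--         if len(xs) <= 1:
--             return copy(xs)
--         r = []
--         for i in range(0, len(xs) - 1):
--           r.append(xs[i])
--           r.append(d)
--         r.append(xs[-1])
--         return r
--
--     wCol = [ max([len(get(i,j)) for i in range(0, len(t))]) for j in range(0,nCol)]
--     topline = ul + tt.join([ ''.join([h] * (i + 2)) for i in wCol ]) + ur
--     midline = xl + x.join([ ''.join([h] * (i + 2)) for i in wCol ]) + xr
--     botline = ll + lt.join([ ''.join([h] * (i + 2)) for i in wCol ]) + lr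
--     ilines = [ v + ' ' +\
--                (' ' + v + ' ').join(\
--                  [' ' * ((wCol[j] - len(get(i,j))) // 2) +\
--                   get(i, j) +\
--                   ' ' * (wCol[j] - len(get(i,j)) - (wCol[j] - len(get(i,j))) // 2)\
--                   for j in range(0, nCol)]\
--                ) + ' ' + v
--               for i in range(0, len(t))]
--     return '\n'.join([topline] + intersperse(midline,ilines) + [botline])
-- ===== SOURCE B (Python) =====
-- def strtable(t):
--     H, X, TT, LT, UL, UR, LR, LL, V, XL, XR = '━', '╋', '┳', '┻', '┏', '┓', '┛', '┗', '┃', '┣', '┫'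
--     nCol = max(map(len, t))
--     cells = [[str(c) for c in row] + [''] * (nCol - len(row)) for row in t]
--     widths = [0] * nCol
--     for row in cells:
--         widths = [max(w, len(c)) for w, c in zip(widths, row)]
--
--     def border(l, m, r):
--         return l + m.join(H * (w + 2) for w in widths) + r
--
--     def fmt(row):
--         out = []
--         for w, c in zip(widths, row):
--             pad = w - len(c)
--             out.append(' ' * (pad // 2) + c + ' ' * (pad - pad // 2))
--         return V + ' ' + (' ' + V + ' ').join(out) + ' ' + V
--
--     mid = border(XL, X, XR)
--     rows = [fmt(row) for row in cells]
--     lines = [border(UL, TT, UR)]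
--     for k, line in enumerate(rows):
--         if k:
--             lines.append(mid)
--         lines.append(line)
--     lines.append(border(LL, LT, LR))
--     return '\n'.join(lines)
-- ===== Notes on version B (the rewrite author's own statement) =====
-- stated objective: simpler
-- what changed: B materialises a padded cell matrix once, computes column widths by a single running zip/max fold over the rows instead of A's per-column max over repeated indexed get(i,j) probes, and interleaves border lines with an enumerate loop instead of A's index-based intersperse helper.
import Mathlib
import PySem

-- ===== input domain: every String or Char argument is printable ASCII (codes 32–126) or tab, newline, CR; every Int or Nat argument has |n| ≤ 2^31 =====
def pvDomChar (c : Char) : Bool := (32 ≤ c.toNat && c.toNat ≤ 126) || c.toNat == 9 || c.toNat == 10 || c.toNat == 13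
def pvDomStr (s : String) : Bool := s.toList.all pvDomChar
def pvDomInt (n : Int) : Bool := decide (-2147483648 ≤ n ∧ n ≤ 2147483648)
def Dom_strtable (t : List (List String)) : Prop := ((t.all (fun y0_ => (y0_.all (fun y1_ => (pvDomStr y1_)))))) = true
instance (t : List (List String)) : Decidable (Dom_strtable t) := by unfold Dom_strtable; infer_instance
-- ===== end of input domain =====

-- B renders the same table by first materialising a padded cell matrix, folding per-row maxima
-- for the column widths and interleaving borders with an enumerate loop (objective: simpler, no speed claim).

-- exact port of `c_str * n` for a single-character string: Python yields '' for n ≤ 0, toNat clamps the same way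
def pvRep (c : Char) (n : Int) : String := String.ofList (List.replicate n.toNat c)

-- ===== PORT A =====
-- def get(i,j): try: return str(t[i][j]) except: return ''   (the except branch is the `getD ""`)
def pvGetA (t : List (List String)) (i j : Int) : String :=
  ((PySem.List.pyGet? t i).bind (fun r => PySem.List.pyGet? r j)).getD ""

-- def intersperse(d, xs) of A, literally: the index loop appending xs[i], d, then xs[-1]
def pvIntersperseA (d : String) (xs : List String) : List String :=
  if xs.length ≤ 1 then xs
  else ((PySem.List.pyRange 0 ((xs.length : Int) - 1) 1).foldl
          (fun r i => r ++ [(PySem.List.pyGet? xs i).getD "", d]) [])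
       ++ [(PySem.List.pyGet? xs (-1)).getD ""]

def strtable (t : List (List String)) : String :=
  -- nCol = max(map(len, t)) ; the `none` branch is Python's ValueError on an empty table, excluded by Pre_
  match PySem.List.max? (t.map (fun r => (r.length : Int))) (fun x => x) with
  | none => ""
  | some nCol =>
    let wCol : List Int := (PySem.List.pyRange 0 nCol 1).map (fun j =>
      (PySem.List.max? ((PySem.List.pyRange 0 (t.length : Int) 1).map
          (fun i => PySem.Str.len (pvGetA t i j))) (fun x => x)).getD 0)
    let topline := "┏" ++ PySem.Str.join "┳" (wCol.map (fun i => PySem.Str.join "" (List.replicate (i + 2).toNat "━"))) ++ "┓"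
    let midline := "┣" ++ PySem.Str.join "╋" (wCol.map (fun i => PySem.Str.join "" (List.replicate (i + 2).toNat "━"))) ++ "┫"
    let botline := "┗" ++ PySem.Str.join "┻" (wCol.map (fun i => PySem.Str.join "" (List.replicate (i + 2).toNat "━"))) ++ "┛"
    let ilines := (PySem.List.pyRange 0 (t.length : Int) 1).map (fun i =>
      "┃" ++ " " ++ PySem.Str.join " ┃ " ((PySem.List.pyRange 0 nCol 1).map (fun j =>
        pvRep ' ' (PySem.Int.floordiv (PySem.List.pyGetD wCol j 0 - PySem.Str.len (pvGetA t i j)) 2) ++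
        pvGetA t i j ++
        pvRep ' ' (PySem.List.pyGetD wCol j 0 - PySem.Str.len (pvGetA t i j) -
                   PySem.Int.floordiv (PySem.List.pyGetD wCol j 0 - PySem.Str.len (pvGetA t i j)) 2))) ++ " " ++ "┃")
    PySem.Str.join "\n" ([topline] ++ pvIntersperseA midline ilines ++ [botline])

-- ===== PORT B =====
def pvPadRow (nCol : Nat) (row : List String) : List String :=
  row ++ List.replicate (nCol - row.length) ""

def pvBorder (widths : List Int) (l m r : String) : String :=
  l ++ PySem.Str.join m (widths.map (fun w => pvRep '━' (w + 2))) ++ r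

def pvFmt (widths : List Int) (row : List String) : String :=
  "┃" ++ " " ++ PySem.Str.join " ┃ " ((widths.zip row).map (fun p =>
    pvRep ' ' (PySem.Int.floordiv (p.1 - PySem.Str.len p.2) 2) ++
    p.2 ++
    pvRep ' ' (p.1 - PySem.Str.len p.2 - PySem.Int.floordiv (p.1 - PySem.Str.len p.2) 2))) ++ " " ++ "┃"

def strtable_alt (t : List (List String)) : String :=
  match PySem.List.max? (t.map (fun r => (r.length : Int))) (fun x => x) with
  | none => ""  -- Python's max([]) ValueError, excluded by Pre_
  | some nColI =>
    let nCol := nColI.toNat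
    let cells := t.map (pvPadRow nCol)
    let widths := cells.foldl
      (fun ws row => (ws.zip row).map (fun p => max p.1 (PySem.Str.len p.2)))
      (List.replicate nCol (0 : Int))
    let mid := pvBorder widths "┣" "╋" "┫"
    let rows := cells.map (pvFmt widths)
    let lines := (PySem.List.enumerate rows 0).foldl
      (fun acc p => (if p.1 ≠ 0 then acc ++ [mid] else acc) ++ [p.2])
      [pvBorder widths "┏" "┳" "┓"]
    PySem.Str.join "\n" (lines ++ [pvBorder widths "┗" "┻" "┛"])

-- ===== PRECONDITION & SPEC =====
-- Pre_ excludes only the empty table, on which Python A raises ValueError (max of an empty sequence)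
def Pre_strtable (t : List (List String)) : Prop := t ≠ []
instance (t : List (List String)) : Decidable (Pre_strtable t) := by unfold Pre_strtable; infer_instance
def pvWitness_strtable : List (List String) := [["a"], ["bb", "c"]]

def Spec_strtable (t : List (List String)) (out : String) : Prop := out = strtable_alt t
instance (t : List (List String)) (out : String) : Decidable (Spec_strtable t out) := by unfold Spec_strtable; infer_instance

-- ===== CLAIM =====
def Claim_equal_strtable : Prop := ∀ (t : List (List String)), Dom_strtable t → Pre_strtable t → Spec_strtable t (strtable t)

-- ===== LEMMAS AND PROOFS =====


-- ---- small bridges ----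
theorem pv_joinRep_chars (m : Nat) :
    PySem.Chars.join [] (List.replicate m ['━']) = List.replicate m '━' := by
  induction m with
  | zero => simp [PySem.Chars.join_nil]
  | succ k ih =>
    cases k with
    | zero => simp [PySem.Chars.join_singleton]
    | succ k' =>
      simp only [List.replicate_succ] at ih ⊢
      rw [PySem.Chars.join_cons_cons, ih]
      simp

theorem pv_joinRep (m : Nat) :
    PySem.Str.join "" (List.replicate m "━") = String.ofList (List.replicate m '━') := by
  have : List.map String.toList (List.replicate m "━") = List.replicate m ['━'] := by
    simp
  rw [PySem.Str.join, this]
  have h0 : "".toList = ([] : List Char) := rfl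
  rw [h0, pv_joinRep_chars]

theorem pv_map_range_getD {α β : Type} (xs : List α) (d : α) (H : α → β) :
    (List.range xs.length).map (fun k => H (xs[k]?.getD d)) = xs.map H := by
  induction xs with
  | nil => simp
  | cons x l ih =>
    simp [List.range_succ_eq_map, List.map_map, Function.comp_def, ih]

theorem pv_getA_nat (t : List (List String)) (k j : Nat) (hk : k < t.length) :
    pvGetA t (k : Int) (j : Int) = (t[k]'hk)[j]?.getD "" := by
  simp [pvGetA, List.getElem?_eq_getElem hk]

theorem pv_pad_get (N : Nat) (r : List String) (j : Nat) (hr : r.length ≤ N) (hj : j < N) :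
    (pvPadRow N r)[j]?.getD "" = r[j]?.getD "" := by
  unfold pvPadRow
  by_cases h : j < r.length
  · simp [List.getElem?_append_left h]
  · have h1 : r[j]? = none := by simp; omega
    have h2 : j - r.length < N - r.length := by omega
    rw [List.getElem?_append_right (by omega)]
    simp [h1, h2]

theorem pv_pad_length (N : Nat) (r : List String) (hr : r.length ≤ N) :
    (pvPadRow N r).length = N := by
  simp [pvPadRow]; omega

-- ---- widths fold ----
theorem pv_fold_widths (rows : List (List String)) (init : List Int)
    (h : ∀ r ∈ rows, init.length ≤ r.length) :
    rows.foldl (fun ws row => (ws.zip row).map (fun p => max p.1 (PySem.Str.len p.2))) init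
    = (List.range init.length).map
        (fun j => rows.foldl (fun a row => max a (PySem.Str.len (row[j]?.getD ""))) (init[j]?.getD 0)) := by
  induction rows generalizing init with
  | nil =>
    symm
    simpa using pv_map_range_getD init 0 (fun x => x)
  | cons r rs ih =>
    have hr : init.length ≤ r.length := h r (by simp)
    have hlen : ((init.zip r).map (fun p => max p.1 (PySem.Str.len p.2))).length = init.length := by
      simp; omega
    simp only [List.foldl_cons]
    rw [ih _ (by intro r' hr'; rw [hlen]; exact h r' (by simp [hr']))]
    rw [hlen]
    apply List.map_congr_left
    intro j hj
    rw [List.mem_range] at hj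
    congr 1
    have h1 : ((init.zip r).map (fun p => max p.1 (PySem.Str.len p.2)))[j]?.getD 0
        = max (init[j]'hj) (PySem.Str.len (r[j]'(by omega))) := by
      have hj2 : j < ((init.zip r).map (fun p => max p.1 (PySem.Str.len p.2))).length := by omega
      rw [List.getElem?_eq_getElem hj2]
      simp [List.getElem_zip]
    rw [h1, List.getElem?_eq_getElem hj, List.getElem?_eq_getElem (show j < r.length by omega)]
    simp

-- ---- intersperse: B side ----
theorem pv_flatMap_intersperse {α : Type} (d x : α) (rest : List α) :
    x :: rest.flatMap (fun y => [d, y]) = List.intersperse d (x :: rest) := by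
  induction rest generalizing x with
  | nil => simp
  | cons y rs ih => simp only [List.flatMap_cons, List.intersperse]; simp [← ih]

theorem pv_enum_fold {α : Type} (d : α) (rest : List α) (s : Int) (acc : List α) (hs : 1 ≤ s) :
    (PySem.List.enumerate rest s).foldl
        (fun acc p => (if p.1 ≠ 0 then acc ++ [d] else acc) ++ [p.2]) acc
    = acc ++ rest.flatMap (fun y => [d, y]) := by
  induction rest generalizing s acc with
  | nil => simp [PySem.List.enumerate_nil]
  | cons x xs ih =>
    rw [PySem.List.enumerate_cons, List.foldl_cons]
    have hne : (s ≠ 0) = True := by simp; omega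
    simp only [hne, if_true]
    rw [ih (s + 1) _ (by omega)]
    simp

theorem pv_enum_build {α : Type} (d top : α) (xs : List α) :
    (PySem.List.enumerate xs 0).foldl
        (fun acc p => (if p.1 ≠ 0 then acc ++ [d] else acc) ++ [p.2]) [top]
    = [top] ++ List.intersperse d xs := by
  cases xs with
  | nil => simp [PySem.List.enumerate_nil]
  | cons x rest =>
    rw [PySem.List.enumerate_cons, List.foldl_cons, pv_enum_fold d rest (0 + 1) _ (by omega)]
    simp [← pv_flatMap_intersperse d x rest]

-- ---- intersperse: A side ----
theorem pv_core_A (d : String) (xs : List String) (hxs : xs ≠ []) :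
    (List.range (xs.length - 1)).flatMap (fun k => [xs[k]?.getD "", d]) ++ [xs.getLast?.getD ""]
    = List.intersperse d xs := by
  induction xs with
  | nil => simp at hxs
  | cons x xs' ih =>
    cases xs' with
    | nil => simp
    | cons y rest =>
      have hlen : (x :: y :: rest).length - 1 = rest.length + 1 := by simp
      rw [hlen, List.range_succ_eq_map, List.flatMap_cons]
      have hmap : (List.map Nat.succ (List.range rest.length)).flatMap
            (fun k => [(x :: y :: rest)[k]?.getD "", d])
          = (List.range ((y :: rest).length - 1)).flatMap (fun k => [(y :: rest)[k]?.getD "", d]) := by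
        rw [List.flatMap_map]
        simp
      rw [hmap]
      simp only [List.getLast?_cons_cons]
      have := ih (by simp)
      simp only [List.intersperse]
      rw [List.append_assoc, this]
      simp

theorem pv_I_A (d : String) (xs : List String) :
    pvIntersperseA d xs = List.intersperse d xs := by
  unfold pvIntersperseA
  by_cases h : xs.length ≤ 1
  · rw [if_pos h]
    match xs, h with
    | [], _ => simp
    | [x], _ => simp
  · rw [if_neg h]
    rw [PySem.List.foldl_append_eq_flatMap (fun i => [(PySem.List.pyGet? xs i).getD "", d]),
        PySem.List.pyGet?_neg_one]
    have hc : ((xs.length : Int) - 1) = ((xs.length - 1 : Nat) : Int) := by omega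
    rw [hc, PySem.List.pyRange_one]
    simp only [sub_zero, Int.toNat_natCast, List.flatMap_map, zero_add,
      PySem.List.pyGet?_natCast, List.nil_append]
    exact pv_core_A d xs (by intro hh; simp [hh] at h)

theorem pv_getA_getD (t : List (List String)) (k j : Nat) (hk : k < t.length) :
    pvGetA t (k : Int) (j : Int) = ((t[k]?.getD [])[j]?.getD "") := by
  rw [pv_getA_nat t k j hk]
  simp [List.getElem?_eq_getElem hk]

theorem pv_len_nonneg (s : String) : (0 : Int) ≤ PySem.Str.len s := by
  rw [PySem.Str.len_eq]; positivity

-- A's per-column max equals B's running fold of widths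
theorem pv_wCol_eq (t : List (List String)) (N : Nat) (ht : t ≠ [])
    (hN : ∀ r ∈ t, r.length ≤ N) :
    (PySem.List.pyRange 0 (N : Int) 1).map (fun j =>
      (PySem.List.max? ((PySem.List.pyRange 0 (t.length : Int) 1).map
          (fun i => PySem.Str.len (pvGetA t i j))) (fun x => x)).getD 0)
    = (t.map (pvPadRow N)).foldl
        (fun ws row => (ws.zip row).map (fun p => max p.1 (PySem.Str.len p.2)))
        (List.replicate N (0 : Int)) := by
  rw [pv_fold_widths _ _ (by
    intro r hr
    simp only [List.mem_map] at hr
    obtain ⟨r0, hr0, rfl⟩ := hr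
    rw [pv_pad_length N r0 (hN r0 hr0)]
    simp)]
  rw [PySem.List.pyRange_one 0 (N : Int)]
  simp only [sub_zero, Int.toNat_natCast, List.map_map, Function.comp_def, zero_add,
    List.length_replicate]
  apply List.map_congr_left
  intro j hj
  rw [List.mem_range] at hj
  -- LHS at column j
  have hinner : (PySem.List.pyRange 0 (t.length : Int) 1).map
      (fun i => PySem.Str.len (pvGetA t i (j : Int)))
      = t.map (fun r => PySem.Str.len (r[j]?.getD "")) := by
    rw [PySem.List.pyRange_one]
    simp only [sub_zero, Int.toNat_natCast, List.map_map, Function.comp_def, zero_add]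
    rw [← pv_map_range_getD t [] (fun r => PySem.Str.len (r[j]?.getD ""))]
    apply List.map_congr_left
    intro k hk
    rw [List.mem_range] at hk
    rw [pv_getA_getD t k j hk]
  -- RHS at column j
  have hrhs : (t.map (pvPadRow N)).foldl
      (fun a row => max a (PySem.Str.len (row[j]?.getD ""))) ((List.replicate N (0:Int))[j]?.getD 0)
      = t.foldl (fun a r => max a (PySem.Str.len (r[j]?.getD ""))) 0 := by
    rw [List.getElem?_eq_getElem (by simpa using hj)]
    simp only [List.getElem_replicate, List.foldl_map]
    exact PySem.List.foldl_congr_mem t _ _ 0 (fun acc r hr => by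
      rw [pv_pad_get N r j (hN r hr) hj])
  rw [hinner, hrhs]
  cases t with
  | nil => exact absurd rfl ht
  | cons r0 rs =>
    simp only [List.map_cons]
    rw [PySem.List.max?_id_cons]
    simp only [Option.getD_some, List.foldl_cons]
    rw [max_eq_right (pv_len_nonneg _), List.foldl_map]

-- A's body lines equal B's formatted padded rows
theorem pv_ilines_eq (t : List (List String)) (N : Nat) (W : List Int)
    (hN : ∀ r ∈ t, r.length ≤ N) (hW : W.length = N) :
    (PySem.List.pyRange 0 (t.length : Int) 1).map (fun i =>
      "┃" ++ " " ++ PySem.Str.join " ┃ " ((PySem.List.pyRange 0 (N : Int) 1).map (fun j =>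
        pvRep ' ' (PySem.Int.floordiv (PySem.List.pyGetD W j 0 - PySem.Str.len (pvGetA t i j)) 2) ++
        pvGetA t i j ++
        pvRep ' ' (PySem.List.pyGetD W j 0 - PySem.Str.len (pvGetA t i j) -
                   PySem.Int.floordiv (PySem.List.pyGetD W j 0 - PySem.Str.len (pvGetA t i j)) 2))) ++ " " ++ "┃")
    = (t.map (pvPadRow N)).map (pvFmt W) := by
  rw [PySem.List.pyRange_one 0 (t.length : Int)]
  simp only [sub_zero, Int.toNat_natCast, List.map_map, Function.comp_def, zero_add]
  rw [← pv_map_range_getD t [] (fun r => pvFmt W (pvPadRow N r))]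
  apply List.map_congr_left
  intro k hk
  rw [List.mem_range] at hk
  have hkmem : t[k]?.getD [] ∈ t := by
    rw [List.getElem?_eq_getElem hk]; exact List.getElem_mem hk
  set r : List String := t[k]?.getD [] with hr
  have hrN : r.length ≤ N := hN r hkmem
  unfold pvFmt
  have hjoin : (PySem.List.pyRange 0 (N : Int) 1).map (fun j =>
        pvRep ' ' (PySem.Int.floordiv (PySem.List.pyGetD W j 0 - PySem.Str.len (pvGetA t (k : Int) j)) 2) ++
        pvGetA t (k : Int) j ++
        pvRep ' ' (PySem.List.pyGetD W j 0 - PySem.Str.len (pvGetA t (k : Int) j) -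
                   PySem.Int.floordiv (PySem.List.pyGetD W j 0 - PySem.Str.len (pvGetA t (k : Int) j)) 2))
      = (W.zip (pvPadRow N r)).map (fun p =>
        pvRep ' ' (PySem.Int.floordiv (p.1 - PySem.Str.len p.2) 2) ++
        p.2 ++
        pvRep ' ' (p.1 - PySem.Str.len p.2 - PySem.Int.floordiv (p.1 - PySem.Str.len p.2) 2)) := by
    apply List.ext_getElem
    · simp [PySem.List.pyRange_one, pv_pad_length N r hrN, hW]
    intro j hj1 hj2
    have hjN : j < N := by
      simpa [PySem.List.pyRange_one] using hj1
    simp only [List.getElem_map, List.getElem_zip]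
    rw [PySem.List.getElem_pyRange_one]
    have hget : pvGetA t (k : Int) ((0 : Int) + (j : Int)) = (pvPadRow N r)[j]'(by
        rw [pv_pad_length N r hrN]; exact hjN) := by
      rw [zero_add, pv_getA_getD t k j hk, ← hr, ← pv_pad_get N r j hrN hjN,
        List.getElem?_eq_getElem (show j < (pvPadRow N r).length by
          rw [pv_pad_length N r hrN]; exact hjN)]
      rfl
    have hw : PySem.List.pyGetD W ((0 : Int) + (j : Int)) 0 = W[j]'(by omega) := by
      rw [zero_add, PySem.List.pyGetD_natCast]
      exact List.getD_eq_getElem W 0 (by omega)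
    rw [hget, hw]
  rw [hjoin]

theorem pv_seg_eq (i : Int) :
    PySem.Str.join "" (List.replicate (i + 2).toNat "━") = pvRep '━' (i + 2) := by
  unfold pvRep
  exact pv_joinRep _

-- ===== VERDICT =====
theorem strtable_spec : Claim_equal_strtable := by
  intro t _hdom hpre
  unfold Spec_strtable strtable strtable_alt
  cases hM : PySem.List.max? (t.map (fun r => ((r.length : Int)))) (fun x => x) with
  | none => rfl
  | some M =>
    have hmem := PySem.List.max?_mem hM
    have hMnn : 0 ≤ M := by
      rw [List.mem_map] at hmem
      obtain ⟨r, _, rfl⟩ := hmem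
      positivity
    have hMN : M = (M.toNat : Int) := by omega
    have hN : ∀ r ∈ t, r.length ≤ M.toNat := by
      intro r hr
      have := PySem.List.max?_isMax hM ((r.length : Int)) (List.mem_map_of_mem hr)
      omega
    dsimp only
    rw [hMN]
    rw [pv_wCol_eq t M.toNat hpre hN]
    have hWlen : ((t.map (pvPadRow M.toNat)).foldl
        (fun ws row => (ws.zip row).map (fun p => max p.1 (PySem.Str.len p.2)))
        (List.replicate M.toNat (0 : Int))).length = M.toNat := by
      rw [pv_fold_widths _ _ (by
        intro r hr
        rw [List.mem_map] at hr
        obtain ⟨r0, hr0, rfl⟩ := hr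
        rw [pv_pad_length _ _ (hN r0 hr0)]
        simp)]
      simp
    rw [pv_ilines_eq t M.toNat _ hN hWlen]
    simp only [pv_seg_eq]
    rw [pv_I_A, pv_enum_build]
    unfold pvBorder
    simp [max_eq_left hMnn]
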